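-- pv_equiv track=rewrite | github.com/BiologyHazard/Wordle-Bot | wordlegame.py | calc_hint
-- ===== SOURCE A (Python) =====
-- def calc_hint(ans, guess):
--     hint = [-1 for i in range(5)]
--     ans_matched = [False for i in range(5)]
--     for i in range(5):
--         if guess[i] == ans[i]:
--             hint[i] = 2
--             ans_matched[i] = True
--         elif guess[i] not in ans:
--             hint[i] = 0
--     for i in range(5):
--         if hint[i] == -1:
--             for j in range(5):
--                 if not ans_matched[j] and guess[i] == ans[j]:
--                     hint[i] = 1
--                     ans_matched[j] = True
--                     break
--             if hint[i] == -1: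
--                 hint[i] = 0
--     return hint
-- ===== SOURCE B (Python) =====
-- def calc_hint(ans, guess):
--     hint = [0, 0, 0, 0, 0]
--     counts = {}
--     for i in range(5):
--         counts[ans[i]] = counts.get(ans[i], 0) + 1
--     for i in range(5):
--         if guess[i] == ans[i]:
--             hint[i] = 2
--             counts[guess[i]] -= 1
--     for i in range(5):
--         if hint[i] == 0 and counts.get(guess[i], 0) > 0:
--             hint[i] = 1
--             counts[guess[i]] -= 1
--     return hint
-- ===== Notes on version B (the rewrite author's own statement) =====
-- stated objective: idiomatic
-- what changed: B replaces A's ans_matched boolean array and nested positional rescans of the answer by a single letter-count dict built once, decremented by the green pass and consumed left-to-right by the yellow pass.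
import Mathlib
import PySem

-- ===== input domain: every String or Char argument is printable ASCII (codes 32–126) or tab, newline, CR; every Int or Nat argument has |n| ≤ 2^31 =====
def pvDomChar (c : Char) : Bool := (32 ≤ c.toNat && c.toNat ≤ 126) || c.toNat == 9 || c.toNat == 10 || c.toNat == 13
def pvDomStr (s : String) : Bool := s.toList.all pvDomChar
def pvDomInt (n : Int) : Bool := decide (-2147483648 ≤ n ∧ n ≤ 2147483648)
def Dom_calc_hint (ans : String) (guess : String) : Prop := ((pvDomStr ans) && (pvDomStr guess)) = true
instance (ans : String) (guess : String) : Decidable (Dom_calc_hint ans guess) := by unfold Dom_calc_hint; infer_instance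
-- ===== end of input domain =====

-- B replaces A's matched-flag array and nested positional scan by a single letter-multiset
-- (dict counter) consumed left to right (objective: idiomatic; not faster).

-- ===== PORT A =====
-- s[i] for 0 ≤ i < 5; Pre_ guarantees i is in range, so the default is never returned.
def pvCharAt (l : List Char) (i : Nat) : Char := l.getD i ' '

-- the inner 'for j in range(5): … break' loop: first j with not ans_matched[j] and guess[i]==ans[j]
def pvFindJ (ansL : List Char) (matched : List Bool) (g : Char) : Option Nat :=
  (List.range 5).find? (fun j => !(matched.getD j true) && (pvCharAt ansL j == g))

def pvPhase1 (ansL guessL : List Char) (st : List Int × List Bool) (i : Nat) :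
    List Int × List Bool :=
  if pvCharAt guessL i = pvCharAt ansL i then (st.1.set i 2, st.2.set i true)
  else if ¬ (pvCharAt guessL i ∈ ansL) then (st.1.set i 0, st.2)
  else st

def pvPhase2 (ansL guessL : List Char) (st : List Int × List Bool) (i : Nat) :
    List Int × List Bool :=
  if st.1.getD i 0 = -1 then
    match pvFindJ ansL st.2 (pvCharAt guessL i) with
    | some j => (st.1.set i 1, st.2.set j true)
    | none => (st.1.set i 0, st.2)
  else st

def calc_hint (ans : String) (guess : String) : List Int :=
  let ansL := ans.toList
  let guessL := guess.toList
  let st1 := (List.range 5).foldl (pvPhase1 ansL guessL)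
      ([-1, -1, -1, -1, -1], [false, false, false, false, false])
  ((List.range 5).foldl (pvPhase2 ansL guessL) st1).1

-- ===== PORT B =====
def pvGreen (ansL guessL : List Char) (st : List Int × PySem.Dict Char Int) (i : Nat) :
    List Int × PySem.Dict Char Int :=
  if pvCharAt guessL i = pvCharAt ansL i then
    (st.1.set i 2,
     st.2.insert (pvCharAt guessL i) (st.2.getD (pvCharAt guessL i) 0 - 1))
  else st

def pvYellow (ansL guessL : List Char) (st : List Int × PySem.Dict Char Int) (i : Nat) :
    List Int × PySem.Dict Char Int :=
  if st.1.getD i 0 = 0 ∧ 0 < st.2.getD (pvCharAt guessL i) 0 then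
    (st.1.set i 1,
     st.2.insert (pvCharAt guessL i) (st.2.getD (pvCharAt guessL i) 0 - 1))
  else st

def calc_hint_alt (ans : String) (guess : String) : List Int :=
  let ansL := ans.toList
  let guessL := guess.toList
  let counts := ((List.range 5).map (pvCharAt ansL)).foldl
      (fun d c => d.insert c (d.getD c 0 + 1)) PySem.Dict.empty
  let st1 := (List.range 5).foldl (pvGreen ansL guessL) ([0, 0, 0, 0, 0], counts)
  ((List.range 5).foldl (pvYellow ansL guessL) st1).1

-- ===== PRECONDITION & SPEC =====
-- Pre_ excludes exactly the inputs where Python A raises IndexError: a string shorter than 5.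
def Pre_calc_hint (ans : String) (guess : String) : Prop :=
  5 ≤ ans.toList.length ∧ 5 ≤ guess.toList.length
instance (ans : String) (guess : String) : Decidable (Pre_calc_hint ans guess) := by
  unfold Pre_calc_hint; infer_instance

def pvWitness_calc_hint : String × String := ("crane", "slate")

def Spec_calc_hint (ans : String) (guess : String) (out : List Int) : Prop := out = calc_hint_alt ans guess
instance (ans : String) (guess : String) (out : List Int) : Decidable (Spec_calc_hint ans guess out) := by unfold Spec_calc_hint; infer_instance

-- ===== CLAIM (what is proved, stated in full; the proofs are below) =====
def Claim_equal_calc_hint : Prop := ∀ (ans : String) (guess : String), Dom_calc_hint ans guess → Pre_calc_hint ans guess → Spec_calc_hint ans guess (calc_hint ans guess)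

-- ===== LEMMAS AND PROOFS =====

-- number of yet-unmatched answer positions (among 0..4) holding letter c
def mCount (ansL : List Char) (matched : List Bool) (c : Char) : Nat :=
  (List.range 5).countP (fun j => (pvCharAt ansL j == c) && !(matched.getD j true))

theorem pv_getD_set_self {α : Type} (l : List α) (i : Nat) (a d : α) (h : i < l.length) :
    (l.set i a).getD i d = a := by
  simp [List.getD_eq_getElem?_getD, List.getElem?_set_self, h]

theorem pv_getD_set_ne {α : Type} (l : List α) (i k : Nat) (a d : α) (h : k ≠ i) :
    (l.set i a).getD k d = l.getD k d := by
  simp [List.getD_eq_getElem?_getD, List.getElem?_set_ne (by omega : i ≠ k)]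

theorem pv_countP_congr {α : Type} (l : List α) (p q : α → Bool)
    (h : ∀ a ∈ l, p a = q a) : l.countP p = l.countP q := by
  induction l with
  | nil => rfl
  | cons x xs ih =>
    simp only [List.countP_cons, h x (List.mem_cons_self), ih (fun a ha => h a (List.mem_cons_of_mem _ ha))]

theorem pv_countP_update {α : Type} [DecidableEq α] (l : List α) (p q : α → Bool) (j : α)
    (hnd : l.Nodup) (hj : j ∈ l) (hpj : p j = true) (hqj : q j = false)
    (hag : ∀ k ∈ l, k ≠ j → p k = q k) : l.countP p = l.countP q + 1 := by
  induction l with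
  | nil => cases hj
  | cons x xs ih =>
    by_cases hxj : x = j
    · subst hxj
      have hnx : x ∉ xs := (List.nodup_cons.1 hnd).1
      have hcc : xs.countP p = xs.countP q := by
        apply pv_countP_congr
        intro a ha
        exact hag a (List.mem_cons_of_mem _ ha) (fun e => hnx (e ▸ ha))
      simp only [List.countP_cons, hpj, hqj, hcc]
      simp
    · have hjxs : j ∈ xs := by
        rcases List.mem_cons.1 hj with h | h
        · exact absurd h.symm hxj
        · exact h
      have hx : p x = q x := hag x (List.mem_cons_self) hxj
      have hrec := ih (List.nodup_cons.1 hnd).2 hjxs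
        (fun k hk hkj => hag k (List.mem_cons_of_mem _ hk) hkj)
      simp only [List.countP_cons, hx, hrec]
      omega

theorem pv_countP_split {α : Type} (l : List α) (p q : α → Bool) :
    l.countP p = l.countP (fun x => p x && q x) + l.countP (fun x => p x && !q x) := by
  induction l with
  | nil => rfl
  | cons x xs ih =>
    simp only [List.countP_cons, ih]
    cases hp : p x <;> cases hq : q x <;> simp [hp, hq] <;> omega

-- when a fresh unmatched position j with letter g is marked, the unmatched count of g drops by 1
theorem mCount_set (ansL : List Char) (matched : List Bool) (j : Nat) (g : Char)
    (hj5 : j < 5) (hmj : matched.getD j true = false) (haj : pvCharAt ansL j = g) :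
    ∀ c, mCount ansL matched c =
      mCount ansL (matched.set j true) c + (if c = g then 1 else 0) := by
  intro c
  have hjl : j < matched.length := by
    by_contra hno
    rw [List.getD_eq_default _ _ (by omega)] at hmj
    cases hmj
  by_cases hc : c = g
  · subst hc
    simp only [if_pos rfl]
    apply pv_countP_update (l := List.range 5)
      (p := fun k => (pvCharAt ansL k == c) && !(matched.getD k true))
      (q := fun k => (pvCharAt ansL k == c) && !((matched.set j true).getD k true))
      (j := j) List.nodup_range (List.mem_range.2 hj5)
    · have h1 : matched[j]?.getD true = false := hmj
      simp [haj, h1]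
    · have h2 : (matched.set j true)[j]?.getD true = true := by
        simp [List.getElem?_set_self, hjl]
      simp [h2]
    · intro k _ hkj
      simp only [pv_getD_set_ne matched j k true true hkj]
  · simp only [if_neg hc, Nat.add_zero]
    apply pv_countP_congr
    intro k hk
    by_cases hkj : k = j
    · subst hkj
      have : (pvCharAt ansL k == c) = false := by
        simp only [beq_eq_false_iff_ne]; rw [haj]; exact fun e => hc e.symm
      simp [this]
    · simp only [pv_getD_set_ne matched j k true true hkj]

-- characterisation of A's first loop
theorem phase1_spec (ansL guessL : List Char) :
    ∀ (is : List Nat), is.Nodup → (∀ i ∈ is, i < 5) →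
    ∀ (h : List Int) (m : List Bool), h.length = 5 → m.length = 5 →
    (∀ i ∈ is, m.getD i true = false) →
    (is.foldl (pvPhase1 ansL guessL) (h, m)).1.length = 5 ∧
    (is.foldl (pvPhase1 ansL guessL) (h, m)).2.length = 5 ∧
    (∀ k, k ∉ is →
      (is.foldl (pvPhase1 ansL guessL) (h, m)).1.getD k 0 = h.getD k 0 ∧
      (is.foldl (pvPhase1 ansL guessL) (h, m)).2.getD k true = m.getD k true) ∧
    (∀ i ∈ is,
      (is.foldl (pvPhase1 ansL guessL) (h, m)).1.getD i 0 =
        (if pvCharAt guessL i = pvCharAt ansL i then 2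
         else if pvCharAt guessL i ∈ ansL then h.getD i 0 else 0) ∧
      (is.foldl (pvPhase1 ansL guessL) (h, m)).2.getD i true =
        decide (pvCharAt guessL i = pvCharAt ansL i)) := by
  intro is
  induction is with
  | nil =>
    intro _ _ h m hh hm _
    exact ⟨hh, hm, fun k _ => ⟨rfl, rfl⟩, fun i hi => absurd hi (List.not_mem_nil)⟩
  | cons i tl ih =>
    intro hnd hlt h m hh hm hm0
    have hi5 : i < 5 := hlt i List.mem_cons_self
    have hitl : i ∉ tl := (List.nodup_cons.1 hnd).1
    -- the one step
    obtain ⟨h', m', hstep1, hstep2, hstepm⟩ :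
        ∃ h' m', pvPhase1 ansL guessL (h, m) i = (h', m') ∧
          (h'.getD i 0 =
            (if pvCharAt guessL i = pvCharAt ansL i then 2
             else if pvCharAt guessL i ∈ ansL then h.getD i 0 else 0) ∧
           m'.getD i true = decide (pvCharAt guessL i = pvCharAt ansL i) ∧
           h'.length = 5 ∧ m'.length = 5) ∧
          (∀ k, k ≠ i → h'.getD k 0 = h.getD k 0 ∧ m'.getD k true = m.getD k true) := by
      by_cases hg : pvCharAt guessL i = pvCharAt ansL i
      · refine ⟨h.set i 2, m.set i true, by simp [pvPhase1, hg], ⟨?_, ?_, ?_, ?_⟩, ?_⟩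
        · rw [pv_getD_set_self h i 2 0 (by omega), if_pos hg]
        · rw [pv_getD_set_self m i true true (by omega)]; simp [hg]
        · simp [hh]
        · simp [hm]
        · intro k hk; exact ⟨pv_getD_set_ne h i k 2 0 hk, pv_getD_set_ne m i k true true hk⟩
      · by_cases hmem : pvCharAt guessL i ∈ ansL
        · refine ⟨h, m, by simp [pvPhase1, hg, hmem], ⟨?_, ?_, hh, hm⟩, fun k _ => ⟨rfl, rfl⟩⟩
          · rw [if_neg hg, if_pos hmem]
          · rw [hm0 i List.mem_cons_self]; simp [hg]
        · refine ⟨h.set i 0, m, by simp [pvPhase1, hg, hmem], ⟨?_, ?_, ?_, hm⟩, ?_⟩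
          · rw [pv_getD_set_self h i 0 0 (by omega), if_neg hg, if_neg hmem]
          · rw [hm0 i List.mem_cons_self]; simp [hg]
          · simp [hh]
          · intro k hk; exact ⟨pv_getD_set_ne h i k 0 0 hk, rfl⟩
    obtain ⟨hv1, hv2, hl1, hl2⟩ := hstep2
    have hrec := ih (List.nodup_cons.1 hnd).2 (fun j hj => hlt j (List.mem_cons_of_mem _ hj))
      h' m' hl1 hl2
      (fun j hj => by
        rw [(hstepm j (fun e => hitl (e ▸ hj))).2]
        exact hm0 j (List.mem_cons_of_mem _ hj))
    rw [List.foldl_cons, hstep1]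
    obtain ⟨r1, r2, rout, rin⟩ := hrec
    refine ⟨r1, r2, ?_, ?_⟩
    · intro k hk
      have hknotl : k ∉ tl := fun e => hk (List.mem_cons_of_mem _ e)
      have hki : k ≠ i := fun e => hk (e ▸ List.mem_cons_self)
      obtain ⟨o1, o2⟩ := rout k hknotl
      obtain ⟨s1, s2⟩ := hstepm k hki
      exact ⟨o1.trans s1, o2.trans s2⟩
    · intro j hj
      rcases List.mem_cons.1 hj with he | htl
      · subst he
        obtain ⟨o1, o2⟩ := rout j hitl
        exact ⟨o1.trans hv1, o2.trans hv2⟩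
      · obtain ⟨p1, p2⟩ := rin j htl
        have hji : j ≠ i := fun e => hitl (e ▸ htl)
        refine ⟨?_, p2⟩
        rw [p1, (hstepm j hji).1]

-- characterisation of B's green loop
theorem green_spec (ansL guessL : List Char) :
    ∀ (is : List Nat), is.Nodup → (∀ i ∈ is, i < 5) →
    ∀ (h : List Int) (d : PySem.Dict Char Int), h.length = 5 →
    (is.foldl (pvGreen ansL guessL) (h, d)).1.length = 5 ∧
    (∀ k, k ∉ is →
      (is.foldl (pvGreen ansL guessL) (h, d)).1.getD k 0 = h.getD k 0) ∧
    (∀ i ∈ is,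
      (is.foldl (pvGreen ansL guessL) (h, d)).1.getD i 0 =
        (if pvCharAt guessL i = pvCharAt ansL i then 2 else h.getD i 0)) ∧
    (∀ c, (is.foldl (pvGreen ansL guessL) (h, d)).2.getD c 0 =
      d.getD c 0 -
        (is.countP (fun i => (pvCharAt guessL i == pvCharAt ansL i) &&
                             (pvCharAt ansL i == c)) : Int)) := by
  intro is
  induction is with
  | nil =>
    intro _ _ h d hh
    exact ⟨hh, fun k _ => rfl, fun i hi => absurd hi (List.not_mem_nil), fun c => by simp⟩
  | cons i tl ih =>
    intro hnd hlt h d hh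
    have hi5 : i < 5 := hlt i List.mem_cons_self
    have hitl : i ∉ tl := (List.nodup_cons.1 hnd).1
    obtain ⟨h', d', hstep, hv, hl, hne, hd'⟩ :
        ∃ h' d', pvGreen ansL guessL (h, d) i = (h', d') ∧
          (h'.getD i 0 = (if pvCharAt guessL i = pvCharAt ansL i then 2 else h.getD i 0)) ∧
          h'.length = 5 ∧
          (∀ k, k ≠ i → h'.getD k 0 = h.getD k 0) ∧
          (∀ c, d'.getD c 0 = d.getD c 0 -
            (if (pvCharAt guessL i == pvCharAt ansL i) && (pvCharAt ansL i == c)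
             then 1 else 0)) := by
      by_cases hg : pvCharAt guessL i = pvCharAt ansL i
      · refine ⟨h.set i 2,
          d.insert (pvCharAt guessL i) (d.getD (pvCharAt guessL i) 0 - 1),
          by simp [pvGreen, hg], ?_, by simp [hh], ?_, ?_⟩
        · rw [pv_getD_set_self h i 2 0 (by omega), if_pos hg]
        · intro k hk; exact pv_getD_set_ne h i k 2 0 hk
        · intro c
          rw [PySem.Dict.getD_insert]
          by_cases hc : c = pvCharAt guessL i
          · subst hc; simp [hg]
          · rw [if_neg hc]
            have : (pvCharAt ansL i == c) = false := by
              simp only [beq_eq_false_iff_ne]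
              exact fun e => hc (e ▸ hg.symm)
            simp [this]
      · refine ⟨h, d, by simp [pvGreen, hg], by rw [if_neg hg], hh, fun k _ => rfl, ?_⟩
        intro c
        have : (pvCharAt guessL i == pvCharAt ansL i) = false := by
          simp only [beq_eq_false_iff_ne]; exact hg
        simp [this]
    have hrec := ih (List.nodup_cons.1 hnd).2
      (fun j hj => hlt j (List.mem_cons_of_mem _ hj)) h' d' hl
    rw [List.foldl_cons, hstep]
    obtain ⟨r1, rout, rin, rcnt⟩ := hrec
    refine ⟨r1, ?_, ?_, ?_⟩
    · intro k hk
      have hki : k ≠ i := fun e => hk (e ▸ List.mem_cons_self)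
      exact (rout k (fun e => hk (List.mem_cons_of_mem _ e))).trans (hne k hki)
    · intro j hj
      rcases List.mem_cons.1 hj with he | htl
      · subst he; exact (rout j hitl).trans hv
      · have hji : j ≠ i := fun e => hitl (e ▸ htl)
        rw [rin j htl, hne j hji]
    · intro c
      rw [rcnt c, hd' c, List.countP_cons]
      by_cases hcnd : ((pvCharAt guessL i == pvCharAt ansL i) && (pvCharAt ansL i == c)) = true
      · simp only [hcnd, if_pos]
        push_cast
        ring
      · simp only [Bool.not_eq_true] at hcnd
        simp [hcnd]

-- the heart: A's second loop and B's yellow loop agree, given the multiset invariant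
theorem phase2_yellow (ansL guessL : List Char) (hans : 5 ≤ ansL.length) :
    ∀ (is : List Nat), is.Nodup → (∀ i ∈ is, i < 5) →
    ∀ (hA : List Int) (m : List Bool) (hB : List Int) (d : PySem.Dict Char Int),
    hA.length = 5 → m.length = 5 → hB.length = 5 →
    (∀ k, k < 5 → k ∉ is → hA.getD k 0 = hB.getD k 0) →
    (∀ i ∈ is,
      hA.getD i 0 =
        (if pvCharAt guessL i = pvCharAt ansL i then 2
         else if pvCharAt guessL i ∈ ansL then -1 else 0) ∧
      hB.getD i 0 = (if pvCharAt guessL i = pvCharAt ansL i then 2 else 0)) →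
    (∀ c, d.getD c 0 = (mCount ansL m c : Int)) →
    (is.foldl (pvPhase2 ansL guessL) (hA, m)).1.length = 5 ∧
    (is.foldl (pvYellow ansL guessL) (hB, d)).1.length = 5 ∧
    (∀ k, k < 5 →
      (is.foldl (pvPhase2 ansL guessL) (hA, m)).1.getD k 0 =
      (is.foldl (pvYellow ansL guessL) (hB, d)).1.getD k 0) := by
  intro is
  induction is with
  | nil =>
    intro _ _ hA m hB d hhA _ hhB hout _ _
    exact ⟨hhA, hhB, fun k hk => hout k hk (List.not_mem_nil)⟩
  | cons i tl ih =>
    intro hnd hlt hA m hB d hhA hhm hhB hout hin hcnt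
    have hi5 : i < 5 := hlt i List.mem_cons_self
    have hitl : i ∉ tl := (List.nodup_cons.1 hnd).1
    obtain ⟨FA, FB⟩ := hin i List.mem_cons_self
    rw [List.foldl_cons, List.foldl_cons]
    by_cases hg : pvCharAt guessL i = pvCharAt ansL i
    · -- green position: both loops skip
      have eA : pvPhase2 ansL guessL (hA, m) i = (hA, m) := by
        simp only [pvPhase2]
        rw [FA, if_pos hg]
        norm_num
      have eB : pvYellow ansL guessL (hB, d) i = (hB, d) := by
        simp only [pvYellow]
        rw [if_neg (fun hc => by rw [FB, if_pos hg] at hc; exact absurd hc.1 (by norm_num))]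
      rw [eA, eB]
      refine ih (List.nodup_cons.1 hnd).2 (fun j hj => hlt j (List.mem_cons_of_mem _ hj))
        hA m hB d hhA hhm hhB ?_ (fun j hj => hin j (List.mem_cons_of_mem _ hj)) hcnt
      intro k hk5 hk
      by_cases hki : k = i
      · subst hki; rw [FA, FB, if_pos hg, if_pos hg]
      · exact hout k hk5 (by simp [hki, hk])
    · by_cases hmem : pvCharAt guessL i ∈ ansL
      · -- possible yellow: A scans, B consults the counter; agreement via mCount
        rw [if_neg hg, if_pos hmem] at FA
        rw [if_neg hg] at FB
        cases hfind : pvFindJ ansL m (pvCharAt guessL i) with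
        | some j =>
          have hpj := List.find?_some hfind
          have hj5 : j < 5 := List.mem_range.1 (List.mem_of_find?_eq_some hfind)
          simp only [Bool.and_eq_true, Bool.not_eq_true'] at hpj
          obtain ⟨hmj, haj⟩ := hpj
          have haj' : pvCharAt ansL j = pvCharAt guessL i := by
            exact beq_iff_eq.1 haj
          have hmjD : m.getD j true = false := by
            have : m[j]?.getD true = false := hmj
            exact this
          have hpos : 0 < mCount ansL m (pvCharAt guessL i) := by
            unfold mCount
            rw [List.countP_pos_iff]
            refine ⟨j, List.mem_range.2 hj5, ?_⟩
            rw [haj', hmjD]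
            simp
          have eA : pvPhase2 ansL guessL (hA, m) i = (hA.set i 1, m.set j true) := by
            simp only [pvPhase2]
            rw [FA, if_pos rfl, hfind]
          have eB : pvYellow ansL guessL (hB, d) i =
              (hB.set i 1, d.insert (pvCharAt guessL i)
                (d.getD (pvCharAt guessL i) 0 - 1)) := by
            have hgt : 0 < d.getD (pvCharAt guessL i) 0 := by
              rw [hcnt]; exact_mod_cast hpos
            simp only [pvYellow]
            rw [if_pos ⟨FB, hgt⟩]
          rw [eA, eB]
          have hms := mCount_set ansL m j (pvCharAt guessL i) hj5 hmjD haj'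
          refine ih (List.nodup_cons.1 hnd).2 (fun j' hj' => hlt j' (List.mem_cons_of_mem _ hj'))
            _ _ _ _ (by simp [hhA]) (by simp [hhm]) (by simp [hhB]) ?_ ?_ ?_
          · intro k hk5 hk
            by_cases hki : k = i
            · subst hki
              rw [pv_getD_set_self hA k 1 0 (by omega), pv_getD_set_self hB k 1 0 (by omega)]
            · rw [pv_getD_set_ne hA i k 1 0 hki, pv_getD_set_ne hB i k 1 0 hki]
              exact hout k hk5 (by simp [hki, hk])
          · intro j' hj'
            have hji : j' ≠ i := fun e => hitl (e ▸ hj')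
            rw [pv_getD_set_ne hA i j' 1 0 hji, pv_getD_set_ne hB i j' 1 0 hji]
            exact hin j' (List.mem_cons_of_mem _ hj')
          · intro c
            rw [PySem.Dict.getD_insert]
            by_cases hc : c = pvCharAt guessL i
            · have h1 := hms c
              rw [if_pos hc] at h1
              rw [if_pos hc, hc, hcnt]
              rw [hc] at h1
              omega
            · have h1 := hms c
              rw [if_neg hc] at h1
              rw [if_neg hc, hcnt]
              omega
        | none =>
          have hnone := List.find?_eq_none.1 hfind
          have hm0 : mCount ansL m (pvCharAt guessL i) = 0 := by
            apply List.countP_eq_zero.2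
            intro j hj
            have hn := hnone j hj
            simp only [Bool.and_eq_true, Bool.not_eq_true'] at hn
            simp only [Bool.and_eq_true, Bool.not_eq_true']
            exact fun hcc => hn ⟨hcc.2, hcc.1⟩
          have eA : pvPhase2 ansL guessL (hA, m) i = (hA.set i 0, m) := by
            simp only [pvPhase2]
            rw [FA, if_pos rfl, hfind]
          have eB : pvYellow ansL guessL (hB, d) i = (hB, d) := by
            have hng : ¬ 0 < d.getD (pvCharAt guessL i) 0 := by
              rw [hcnt, hm0]; simp
            simp only [pvYellow]
            rw [if_neg (fun hc => hng hc.2)]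
          rw [eA, eB]
          refine ih (List.nodup_cons.1 hnd).2 (fun j' hj' => hlt j' (List.mem_cons_of_mem _ hj'))
            _ _ _ _ (by simp [hhA]) hhm hhB ?_ ?_ hcnt
          · intro k hk5 hk
            by_cases hki : k = i
            · subst hki
              rw [pv_getD_set_self hA k 0 0 (by omega), FB]
            · rw [pv_getD_set_ne hA i k 0 0 hki]
              exact hout k hk5 (by simp [hki, hk])
          · intro j' hj'
            have hji : j' ≠ i := fun e => hitl (e ▸ hj')
            rw [pv_getD_set_ne hA i j' 0 0 hji]
            exact hin j' (List.mem_cons_of_mem _ hj')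
      · -- letter absent from the answer: both loops skip
        rw [if_neg hg, if_neg hmem] at FA
        rw [if_neg hg] at FB
        have hm0 : mCount ansL m (pvCharAt guessL i) = 0 := by
          apply List.countP_eq_zero.2
          intro j hj
          have hj5 : j < 5 := List.mem_range.1 hj
          have hjm : pvCharAt ansL j ∈ ansL := by
            unfold pvCharAt
            rw [List.getD_eq_getElem _ _ (by omega)]
            exact List.getElem_mem _
          have : (pvCharAt ansL j == pvCharAt guessL i) = false := by
            simp only [beq_eq_false_iff_ne]
            exact fun e => hmem (e ▸ hjm)
          simp [this]
        have eA : pvPhase2 ansL guessL (hA, m) i = (hA, m) := by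
          simp only [pvPhase2]
          rw [FA]
          norm_num
        have eB : pvYellow ansL guessL (hB, d) i = (hB, d) := by
          have hng : ¬ 0 < d.getD (pvCharAt guessL i) 0 := by
            rw [hcnt, hm0]; simp
          simp only [pvYellow]
          rw [if_neg (fun hc => hng hc.2)]
        rw [eA, eB]
        refine ih (List.nodup_cons.1 hnd).2 (fun j hj => hlt j (List.mem_cons_of_mem _ hj))
          hA m hB d hhA hhm hhB ?_ (fun j hj => hin j (List.mem_cons_of_mem _ hj)) hcnt
        intro k hk5 hk
        by_cases hki : k = i
        · subst hki; rw [FA, FB]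
        · exact hout k hk5 (by simp [hki, hk])

-- assembling the phases: the two full computations agree
theorem calc_hint_core (ansL guessL : List Char) (ha5 : 5 ≤ ansL.length) :
    ((List.range 5).foldl (pvPhase2 ansL guessL)
      ((List.range 5).foldl (pvPhase1 ansL guessL)
        ([-1, -1, -1, -1, -1], [false, false, false, false, false]))).1 =
    ((List.range 5).foldl (pvYellow ansL guessL)
      ((List.range 5).foldl (pvGreen ansL guessL)
        ([0, 0, 0, 0, 0],
         ((List.range 5).map (pvCharAt ansL)).foldl
           (fun d c => d.insert c (d.getD c 0 + 1)) PySem.Dict.empty))).1 := by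
  have hmem5 : ∀ i ∈ List.range 5, i < 5 := fun i hi => List.mem_range.1 hi
  have hlit1 : ∀ i < 5, ([-1, -1, -1, -1, -1] : List Int).getD i 0 = -1 := by
    intro i hi; interval_cases i <;> rfl
  have hlit2 : ∀ i < 5, ([false, false, false, false, false] : List Bool).getD i true = false := by
    intro i hi; interval_cases i <;> rfl
  have hlit3 : ∀ i < 5, ([0, 0, 0, 0, 0] : List Int).getD i 0 = 0 := by
    intro i hi; interval_cases i <;> rfl
  obtain ⟨pa1, pa2, _, pain⟩ := phase1_spec ansL guessL (List.range 5) List.nodup_range hmem5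
    [-1, -1, -1, -1, -1] [false, false, false, false, false] rfl rfl
    (fun i hi => hlit2 i (hmem5 i hi))
  obtain ⟨pb1, _, pbin, pbcnt⟩ := green_spec ansL guessL (List.range 5) List.nodup_range hmem5
    [0, 0, 0, 0, 0]
    (((List.range 5).map (pvCharAt ansL)).foldl
      (fun d c => d.insert c (d.getD c 0 + 1)) PySem.Dict.empty) rfl
  set stA := (List.range 5).foldl (pvPhase1 ansL guessL)
    ([-1, -1, -1, -1, -1], [false, false, false, false, false]) with hstA
  set stB := (List.range 5).foldl (pvGreen ansL guessL)
    ([0, 0, 0, 0, 0],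
     ((List.range 5).map (pvCharAt ansL)).foldl
       (fun d c => d.insert c (d.getD c 0 + 1)) PySem.Dict.empty) with hstB
  -- the multiset invariant holding between the two phases
  have hcnt : ∀ c, stB.2.getD c 0 = (mCount ansL stA.2 c : Int) := by
    intro c
    rw [pbcnt c]
    have hbase : (((List.range 5).map (pvCharAt ansL)).foldl
        (fun d c => d.insert c (d.getD c 0 + 1)) PySem.Dict.empty).getD c 0 =
        (((List.range 5).map (pvCharAt ansL)).count c : Int) := by
      rw [PySem.Dict.getD_foldl_insert_add_one]
      simp
    rw [hbase]
    have hmapcount : ((List.range 5).map (pvCharAt ansL)).count c =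
        (List.range 5).countP (fun j => pvCharAt ansL j == c) := by
      simp [List.count, List.countP_map]
      rfl
    have hmc : mCount ansL stA.2 c =
        (List.range 5).countP
          (fun j => (pvCharAt ansL j == c) && !(pvCharAt guessL j == pvCharAt ansL j)) := by
      unfold mCount
      apply pv_countP_congr
      intro j hj
      rw [(pain j hj).2]
      by_cases hgj : pvCharAt guessL j = pvCharAt ansL j <;> simp [hgj]
    have hswap : (List.range 5).countP
        (fun j => (pvCharAt guessL j == pvCharAt ansL j) && (pvCharAt ansL j == c)) =
        (List.range 5).countP
          (fun j => (pvCharAt ansL j == c) && (pvCharAt guessL j == pvCharAt ansL j)) := by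
      apply pv_countP_congr
      intro j _
      exact Bool.and_comm _ _
    have hsplit := pv_countP_split (List.range 5)
      (fun j => pvCharAt ansL j == c) (fun j => pvCharAt guessL j == pvCharAt ansL j)
    rw [hmapcount, hswap, hmc]
    omega
  have hper : ∀ i ∈ List.range 5,
      stA.1.getD i 0 =
        (if pvCharAt guessL i = pvCharAt ansL i then 2
         else if pvCharAt guessL i ∈ ansL then -1 else 0) ∧
      stB.1.getD i 0 = (if pvCharAt guessL i = pvCharAt ansL i then 2 else 0) := by
    intro i hi
    constructor
    · rw [(pain i hi).1, hlit1 i (hmem5 i hi)]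
    · rw [pbin i hi, hlit3 i (hmem5 i hi)]
  obtain ⟨r1, r2, rpt⟩ := phase2_yellow ansL guessL ha5 (List.range 5) List.nodup_range hmem5
    stA.1 stA.2 stB.1 stB.2 pa1 pa2 pb1
    (fun k hk5 hk => absurd (List.mem_range.2 hk5) hk) hper hcnt
  rw [← Prod.mk.eta (p := stA), ← Prod.mk.eta (p := stB)]
  apply List.ext_getElem (by rw [r1, r2])
  intro k h1 h2
  rw [← List.getD_eq_getElem _ 0 h1, ← List.getD_eq_getElem _ 0 h2]
  exact rpt k (by rw [r1] at h1; omega)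

-- ===== VERDICT (by name: the statement is the Claim_ definition above) =====
theorem calc_hint_spec : Claim_equal_calc_hint := by
  intro ans guess _ hpre
  unfold Spec_calc_hint calc_hint calc_hint_alt
  exact calc_hint_core ans.toList guess.toList hpre.1
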